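-- pv_equiv track=rewrite | github.com/gabogara/week2_session1_2 | session2.py | prioritize_observations
-- ===== SOURCE A (Python) =====
-- def prioritize_observations(observed_species, priority_species):
--     counter = {}
--     solution = []
--     for observed in observed_species:
--         if observed in counter:
--             counter[observed] += 1
--         else:
--             counter[observed] = 1
--
--     for specie in priority_species:
--         if specie in counter:
--             solution.extend([specie] * counter[specie])
--             del counter[specie]
--
--     remaining = []
--
--     for specie in counter:
--         remaining.extend([specie] * counter[specie])
--
--     remaining.sort()
--     solution.extend(remaining)
--
--     return solution
-- ===== SOURCE B (Python) =====
-- def prioritize_observations(observed_species, priority_species):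
--     rank = {}
--     for i, specie in enumerate(priority_species):
--         if specie not in rank:
--             rank[specie] = i
--     n = len(priority_species)
--     return sorted(observed_species, key=lambda s: (rank.get(s, n), s))
-- ===== Notes on version B (the rewrite author's own statement) =====
-- stated objective: idiomatic
-- what changed: A's counter dict, priority emission loop with key deletion and separate sort of the leftovers are replaced by one stable sorted() call keyed by (first-occurrence priority rank, species name).
import Mathlib
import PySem

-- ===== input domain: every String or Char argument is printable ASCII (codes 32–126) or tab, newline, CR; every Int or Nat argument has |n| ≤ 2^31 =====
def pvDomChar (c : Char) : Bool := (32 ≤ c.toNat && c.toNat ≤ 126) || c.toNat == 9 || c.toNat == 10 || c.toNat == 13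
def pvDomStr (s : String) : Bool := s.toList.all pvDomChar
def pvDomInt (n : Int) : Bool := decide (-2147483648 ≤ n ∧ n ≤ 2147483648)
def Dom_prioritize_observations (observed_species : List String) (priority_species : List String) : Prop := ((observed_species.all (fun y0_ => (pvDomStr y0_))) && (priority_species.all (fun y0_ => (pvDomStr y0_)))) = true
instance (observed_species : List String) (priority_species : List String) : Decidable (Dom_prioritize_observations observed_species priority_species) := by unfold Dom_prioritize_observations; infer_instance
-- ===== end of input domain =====

-- B replaces A's counter dict, priority-emission loop with key deletion and separate sort of the
-- leftovers by ONE stable sort of the observations keyed by (first-occurrence priority rank, name)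
-- (objective: idiomatic; no speed claim).

-- ===== PORT A =====
-- literal transliteration of Source A: a count dict, a priority pass that emits blocks and deletes
-- keys, then the leftover blocks, sorted.  '[specie] * counter[specie]' is
-- List.replicate (·).toNat (Python's list repetition of a non-positive count gives [], as toNat does).
def prioritize_observations (observed_species : List String) (priority_species : List String) : List String :=
  let counter : PySem.Dict String Int :=
    observed_species.foldl (fun c observed =>
      if c.contains observed then c.insert observed (c.getD observed 0 + 1)
      else c.insert observed 1) PySem.Dict.empty
  let st :=
    priority_species.foldl (fun (st : List String × PySem.Dict String Int) specie =>
      if st.2.contains specie then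
        (st.1 ++ List.replicate (st.2.getD specie 0).toNat specie, st.2.erase specie)
      else st) (([] : List String), counter)
  let remaining :=
    st.2.keys.foldl (fun acc specie => acc ++ List.replicate (st.2.getD specie 0).toNat specie) []
  st.1 ++ PySem.List.sorted remaining (fun x => x) false

-- ===== PORT B =====
-- literal transliteration of Source B: the setdefault loop over enumerate(priority_species),
-- then one sorted() call with the tuple key (rank.get(s, n), s) — a tuple key is
-- PySem.List.sorted2 per the PySem convention.
def prioritize_observations_alt (observed_species : List String) (priority_species : List String) : List String :=
  let rank : PySem.Dict String Int :=
    (PySem.List.enumerate priority_species 0).foldl (fun (d : PySem.Dict String Int) p =>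
      if d.contains p.2 then d else d.insert p.2 p.1) PySem.Dict.empty
  let n : Int := priority_species.length
  PySem.List.sorted2 observed_species (fun s => rank.getD s n) (fun s => s) false

-- ===== PRECONDITION & SPEC =====
def Spec_prioritize_observations (observed_species : List String) (priority_species : List String) (out : List String) : Prop := out = prioritize_observations_alt observed_species priority_species
instance (observed_species : List String) (priority_species : List String) (out : List String) : Decidable (Spec_prioritize_observations observed_species priority_species out) := by unfold Spec_prioritize_observations; infer_instance

-- ===== CLAIM (what is proved, stated in full; the proofs are below) =====
def Claim_equal_prioritize_observations : Prop := ∀ (observed_species : List String) (priority_species : List String), Dom_prioritize_observations observed_species priority_species → Spec_prioritize_observations observed_species priority_species (prioritize_observations observed_species priority_species)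

-- ===== LEMMAS AND PROOFS =====

-- B's sort key, in closed form: the first-occurrence index of s in pri (or len(pri)), then s.
def pvRk (pri : List String) (s : String) : Int :=
  match PySem.List.index? pri s with
  | some k => (k : Int)
  | none => (pri.length : Int)

def pvKey (pri : List String) (s : String) : Lex (Int × String) := toLex (pvRk pri s, s)

theorem pvKey_injective (pri : List String) : Function.Injective (pvKey pri) := by
  intro a b h
  have := toLex.injective h
  exact congrArg Prod.snd this

theorem pvRk_nonneg (pri : List String) (s : String) : 0 ≤ pvRk pri s := by
  unfold pvRk
  cases PySem.List.index? pri s <;> simp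

theorem pvRk_cons_self (x : String) (t : List String) : pvRk (x :: t) x = 0 := by
  simp [pvRk, PySem.List.index?_eq_idxOf?, List.idxOf?_cons]

theorem pvRk_cons_of_ne (x : String) (t : List String) {y : String} (h : y ≠ x) :
    pvRk (x :: t) y = pvRk t y + 1 := by
  unfold pvRk
  rw [PySem.List.index?_cons_of_ne t (Ne.symm h)]
  cases PySem.List.index? t y <;> simp

theorem pvRk_lt_of_mem {pri : List String} {s : String} (h : s ∈ pri) :
    pvRk pri s < (pri.length : Int) := by
  have hsome : (PySem.List.index? pri s).isSome := by
    simp [PySem.List.index?_eq_idxOf?, List.isSome_idxOf?, h]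
  obtain ⟨k, hk⟩ := Option.isSome_iff_exists.mp hsome
  obtain ⟨hlt, -, -⟩ := PySem.List.getElem_of_index?_eq_some hk
  have hrk : pvRk pri s = (k : Int) := by simp only [pvRk, hk]
  rw [hrk]
  exact_mod_cast hlt

theorem pvRk_of_not_mem {pri : List String} {s : String} (h : s ∉ pri) :
    pvRk pri s = (pri.length : Int) := by
  have : PySem.List.index? pri s = none := by
    simp [PySem.List.index?_eq_idxOf?, List.idxOf?_eq_none_iff, h]
  simp only [pvRk, this]

-- folding `Set.add` into a split accumulator: elements already in the left part are skipped
theorem foldl_add_split {α : Type} [BEq α] [LawfulBEq α] (l : List α) : ∀ (acc₁ acc₂ : List α),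
    l.foldl PySem.Set.add (acc₁ ++ acc₂) = acc₁ ++ (l.filter (fun y => !acc₁.contains y)).foldl PySem.Set.add acc₂ := by
  induction l with
  | nil => intro acc₁ acc₂; simp
  | cons x t ih =>
    intro acc₁ acc₂
    simp only [List.foldl_cons, List.filter_cons]
    by_cases hx : acc₁.contains x
    · have h1 : PySem.Set.add (acc₁ ++ acc₂) x = acc₁ ++ acc₂ := by
        simp only [PySem.Set.add, PySem.Set.contains, List.contains_append, hx, Bool.true_or, if_true]
      rw [h1, ih, hx]; simp
    · simp only [Bool.not_eq_true] at hx
      have h1 : PySem.Set.add (acc₁ ++ acc₂) x = acc₁ ++ PySem.Set.add acc₂ x := by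
        simp only [PySem.Set.add, PySem.Set.contains, List.contains_append, hx, Bool.false_or]
        split <;> simp
      rw [h1, ih, hx]; simp [List.foldl_cons]

-- first-occurrence dedup peels its head
theorem dedup_cons {α : Type} [BEq α] [LawfulBEq α] (x : α) (l : List α) :
    PySem.List.dedup (x :: l) = x :: PySem.List.dedup (l.filter (fun y => !(y == x))) := by
  have h := foldl_add_split l [x] []
  simp only [List.append_nil] at h
  simp only [PySem.List.dedup, PySem.Set.ofList, List.foldl_cons]
  have hadd : PySem.Set.add PySem.Set.empty x = [x] := rfl
  rw [hadd, h]
  simp only [List.singleton_append]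
  congr 2
  apply List.filter_congr
  intro a _
  cases h : (a == x) <;> simp [h, eq_comm]

-- the deduped priority species come in strictly increasing first-occurrence order
theorem dedup_filter_pairwise_rk (l : List String) : ∀ (p : String → Bool),
    (PySem.List.dedup (l.filter p)).Pairwise (fun a b => pvRk l a < pvRk l b) := by
  induction l with
  | nil => intro p; simp [PySem.List.dedup, PySem.Set.ofList]
  | cons x t ih =>
    intro p
    rw [List.filter_cons]
    by_cases hp : p x
    · simp only [hp, if_true]
      rw [dedup_cons]
      rw [List.filter_filter]
      refine List.pairwise_cons.mpr ⟨?_, ?_⟩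
      · intro b hb
        have hbm := (PySem.List.mem_dedup _ _).mp hb
        obtain ⟨hbt, hbp⟩ := List.mem_filter.mp hbm
        have hbx : b ≠ x := by
          intro he; subst he; simp at hbp
        rw [pvRk_cons_self, pvRk_cons_of_ne x t hbx]
        have := pvRk_nonneg t b
        omega
      · refine (ih (fun y => !(y == x) && p y)).imp_of_mem ?_
        intro a b ha hb hab
        have hax : a ≠ x := by
          have := (List.mem_filter.mp ((PySem.List.mem_dedup _ _).mp ha)).2
          intro he; subst he; simp at this
        have hbx : b ≠ x := by
          have := (List.mem_filter.mp ((PySem.List.mem_dedup _ _).mp hb)).2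
          intro he; subst he; simp at this
        rw [pvRk_cons_of_ne x t hax, pvRk_cons_of_ne x t hbx]
        omega
    · simp only [hp, Bool.false_eq_true, if_false]
      refine (ih p).imp_of_mem ?_
      intro a b ha hb hab
      have hax : a ≠ x := by
        have := (List.mem_filter.mp ((PySem.List.mem_dedup _ _).mp ha)).2
        intro he; subst he; simp [hp] at this
      have hbx : b ≠ x := by
        have := (List.mem_filter.mp ((PySem.List.mem_dedup _ _).mp hb)).2
        intro he; subst he; simp [hp] at this
      rw [pvRk_cons_of_ne x t hax, pvRk_cons_of_ne x t hbx]
      omega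

-- blocks of equal species in strictly increasing rank order are key-sorted
theorem pairwise_flatMap_key (pri : List String) : ∀ (ks : List String) (cnt : String → Nat),
    ks.Pairwise (fun a b => pvRk pri a < pvRk pri b) →
    (ks.flatMap (fun s => List.replicate (cnt s) s)).Pairwise
      (fun a b => pvKey pri a ≤ pvKey pri b) := by
  intro ks
  induction ks with
  | nil => intro cnt _; simp
  | cons k t ih =>
    intro cnt hpw
    obtain ⟨hk, ht⟩ := List.pairwise_cons.mp hpw
    rw [List.flatMap_cons]
    refine List.pairwise_append.mpr ⟨?_, ih cnt ht, ?_⟩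
    · exact List.pairwise_replicate.mpr (Or.inr (le_refl _))
    · intro a ha b hb
      have hak : a = k := List.eq_of_mem_replicate ha
      obtain ⟨s, hs, hbs⟩ := List.mem_flatMap.mp hb
      have hbk : b = s := List.eq_of_mem_replicate hbs
      subst hak; subst hbk
      exact le_of_lt (Prod.Lex.toLex_lt_toLex.mpr (Or.inl (hk _ hs)))

-- first-occurrence dedup peels its head (via the Set.ofList characterisation)
theorem count_flatMap_replicate (ks : List String) (n : String → Nat) (x : String)
    (hnd : ks.Nodup) :
    (ks.flatMap (fun k => List.replicate (n k) k)).count x = if x ∈ ks then n x else 0 := by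
  induction ks with
  | nil => simp
  | cons k t ih =>
    simp only [List.flatMap_cons, List.count_append, List.count_replicate, List.mem_cons]
    rcases List.nodup_cons.mp hnd with ⟨hk, ht⟩
    rw [ih ht]
    by_cases hx : x = k
    · subst hx; simp [hk]
    · simp [hx, Ne.symm hx]

-- ---- B's rank loop computes the first-occurrence index ----
theorem rank_fold_get? (l : List String) : ∀ (j : Int) (d : PySem.Dict String Int) (s : String),
    ((PySem.List.enumerate l j).foldl (fun (d : PySem.Dict String Int) p =>
        if d.contains p.2 then d else d.insert p.2 p.1) d).get? s
      = match d.get? s with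
        | some v => some v
        | none => (PySem.List.index? l s).map (fun k => (k : Int) + j) := by
  induction l with
  | nil =>
    intro j d s
    simp only [PySem.List.enumerate, List.foldl_nil]
    cases d.get? s <;> simp [PySem.List.index?_eq_idxOf?]
  | cons x t ih =>
    intro j d s
    rw [PySem.List.enumerate_cons, List.foldl_cons]
    by_cases hc : d.contains x
    · simp only [hc, if_true]
      rw [ih]
      cases hds : d.get? s with
      | some v => rfl
      | none =>
        have hsx : s ≠ x := by
          intro he; subst he
          rw [PySem.Dict.contains_eq_isSome_get?, hds] at hc
          simp at hc
        rw [PySem.List.index?_cons_of_ne t (Ne.symm hsx)]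
        cases PySem.List.index? t s with
        | none => simp
        | some k => simp; ring_nf
    · simp only [hc, Bool.false_eq_true, if_false]
      rw [ih]
      by_cases hsx : s = x
      · subst hsx
        rw [PySem.Dict.get?_insert_self]
        have hds : d.get? s = none := by
          rw [PySem.Dict.contains_eq_isSome_get?] at hc
          cases h : d.get? s
          · rfl
          · rw [h] at hc; simp at hc
        rw [hds]
        simp [PySem.List.index?_eq_idxOf?, List.idxOf?_cons]
      · rw [PySem.Dict.get?_insert_of_ne d _ hsx]
        cases hds : d.get? s with
        | some v => rfl
        | none =>
          rw [PySem.List.index?_cons_of_ne t (Ne.symm hsx)]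
          cases PySem.List.index? t s with
          | none => simp
          | some k => simp; ring_nf

theorem rank_getD (pri : List String) (s : String) :
    (((PySem.List.enumerate pri 0).foldl (fun (d : PySem.Dict String Int) p =>
        if d.contains p.2 then d else d.insert p.2 p.1) PySem.Dict.empty).getD s
      (pri.length : Int)) = pvRk pri s := by
  have h := rank_fold_get? pri 0 PySem.Dict.empty s
  have hemp : (PySem.Dict.empty : PySem.Dict String Int).get? s = none := rfl
  rw [hemp] at h
  simp only [PySem.Dict.getD, h, pvRk]
  cases PySem.List.index? pri s <;> simp

-- ---- sorted2 with a linearly ordered first key is sorted by the lexicographic key ----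
theorem sorted2_eq_sorted_toLex (xs : List String) (k1 : String → Int) :
    PySem.List.sorted2 xs k1 (fun s => s) false
      = PySem.List.sorted xs (fun s => (toLex (k1 s, s) : Lex (Int × String))) false := by
  rw [PySem.List.sorted_eq_foldl_insertBy]
  show List.foldl (fun acc x => PySem.List.insertBy _ x acc) [] xs = _
  congr 1
  funext acc x
  congr 1
  funext a b
  show (decide (k1 a < k1 b) || (!decide (k1 b < k1 a) && decide (a < b)))
      = decide ((toLex (k1 a, a) : Lex (Int × String)) < toLex (k1 b, b))
  rcases lt_trichotomy (k1 a) (k1 b) with h | h | h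
  · simp [h, Prod.Lex.toLex_lt_toLex]
  · simp [h, Prod.Lex.toLex_lt_toLex]
  · simp [not_lt_of_gt h, h, ne_of_gt h, Prod.Lex.toLex_lt_toLex]

-- ---- Dict.erase facts (erase is items.filter) ----
theorem contains_erase {κ ν : Type} [BEq κ] [LawfulBEq κ] (d : PySem.Dict κ ν) (k x : κ) :
    (d.erase k).contains x = (!(x == k) && d.contains x) := by
  simp only [PySem.Dict.contains, PySem.Dict.erase, List.any_filter]
  cases h : (x == k)
  · simp only [Bool.not_false, Bool.true_and]
    apply congrArg
    funext p
    cases hq : (p.1 == x)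
    · simp
    · have : (p.1 == k) = false := by
        have := eq_of_beq hq; subst this; exact h
      simp [this]
  · have hxk := eq_of_beq h
    subst hxk
    simp only [Bool.not_true, Bool.false_and]
    rw [List.any_eq_false]
    intro p _
    cases hq : (p.1 == x) <;> simp

theorem getD_erase_of_ne {κ ν : Type} [BEq κ] [LawfulBEq κ] (d : PySem.Dict κ ν) (k x : κ) (v : ν)
    (h : x ≠ k) : (d.erase k).getD x v = d.getD x v := by
  simp only [PySem.Dict.getD, PySem.Dict.get?, PySem.Dict.erase]
  congr 1
  rw [List.find?_filter]
  have hf : (fun (a : κ × ν) => decide ((!a.1 == k) = true ∧ (a.1 == x) = true)) = (fun p => p.1 == x) := by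
    funext p
    cases hq : (p.1 == x)
    · simp
    · have := eq_of_beq hq; subst this
      simp [beq_false_of_ne h]
  rw [hf]

theorem erase_of_not_contains {κ ν : Type} [BEq κ] [LawfulBEq κ] (d : PySem.Dict κ ν) (k : κ)
    (h : d.contains k = false) : d.erase k = d := by
  apply PySem.Dict.ext
  simp only [PySem.Dict.erase]
  apply List.filter_eq_self.mpr
  intro p hp
  simp only [PySem.Dict.contains, List.any_eq_false] at h
  simp [h p hp]

theorem items_foldl_erase {κ ν : Type} [BEq κ] [LawfulBEq κ] (l : List κ) : ∀ (d : PySem.Dict κ ν),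
    (l.foldl PySem.Dict.erase d).items = d.items.filter (fun p => !l.contains p.1) := by
  induction l with
  | nil => intro d; simp
  | cons x t ih =>
    intro d
    rw [List.foldl_cons, ih, PySem.Dict.erase, List.filter_filter]
    apply List.filter_congr
    intro p _
    cases h1 : (p.1 == x) <;> cases h2 : (t.contains p.1) <;>
      simp_all

-- ---- what A's priority loop emits, as a recursion over the priority list ----
def pvEmit (pri : List String) (d : PySem.Dict String Int) : List String :=
  match pri with
  | [] => []
  | s :: r => (if d.contains s then List.replicate (d.getD s 0).toNat s else []) ++ pvEmit r (d.erase s)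

theorem loopA (pri : List String) : ∀ (sol : List String) (d : PySem.Dict String Int),
    pri.foldl (fun (st : List String × PySem.Dict String Int) specie =>
      if st.2.contains specie then
        (st.1 ++ List.replicate (st.2.getD specie 0).toNat specie, st.2.erase specie)
      else st) (sol, d)
    = (sol ++ pvEmit pri d, pri.foldl PySem.Dict.erase d) := by
  induction pri with
  | nil => intro sol d; simp [pvEmit]
  | cons s r ih =>
    intro sol d
    simp only [List.foldl_cons, pvEmit]
    by_cases h : d.contains s
    · simp only [h, if_true, ih]
      simp
    · simp only [Bool.not_eq_true] at h
      simp only [h, Bool.false_eq_true, if_false, ih, erase_of_not_contains d s h]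
      simp

theorem pvEmit_spec (pri : List String) : ∀ (d : PySem.Dict String Int),
    pvEmit pri d = (PySem.List.dedup (pri.filter (fun s => d.contains s))).flatMap
      (fun s => List.replicate (d.getD s 0).toNat s) := by
  induction pri with
  | nil => intro d; simp [pvEmit, PySem.List.dedup, PySem.Set.ofList]
  | cons s r ih =>
    intro d
    simp only [pvEmit, List.filter_cons]
    by_cases h : d.contains s
    · simp only [h, if_true]
      rw [dedup_cons]
      rw [List.flatMap_cons]
      congr 1
      rw [ih (d.erase s)]
      have hfil : r.filter (fun t => (d.erase s).contains t)
          = (r.filter (fun t => d.contains t)).filter (fun y => !(y == s)) := by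
        rw [List.filter_filter]
        apply List.filter_congr
        intro a _
        rw [contains_erase]
      rw [hfil]
      apply List.flatMap_congr
      intro t ht
      have hts : t ≠ s := by
        have := (PySem.List.mem_dedup _ _).mp ht
        have := (List.mem_filter.mp this).2
        simpa using this
      rw [getD_erase_of_ne d s t 0 hts]
    · simp only [Bool.not_eq_true] at h
      simp only [h, Bool.false_eq_true, if_false, List.nil_append]
      rw [ih (d.erase s)]
      have hfil : r.filter (fun t => (d.erase s).contains t) = r.filter (fun t => d.contains t) := by
        apply List.filter_congr
        intro a _
        rw [contains_erase]
        cases h1 : (a == s)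
        · simp
        · have := eq_of_beq h1; subst this; simp [h]
      rw [hfil]
      apply List.flatMap_congr
      intro t ht
      have hts : t ≠ s := by
        intro he; subst he
        have := (PySem.List.mem_dedup _ _).mp ht
        have := (List.mem_filter.mp this).2
        simp [h] at this
      rw [getD_erase_of_ne d s t 0 hts]

theorem prioritize_observations_spec' : ∀ (observed_species : List String) (priority_species : List String),
    prioritize_observations observed_species priority_species
      = prioritize_observations_alt observed_species priority_species := by
  intro obs pri
  simp only [prioritize_observations, prioritize_observations_alt]
  -- B is the stable sort by pvKey
  rw [show (fun s => ((PySem.List.enumerate pri 0).foldl (fun (d : PySem.Dict String Int) p =>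
        if d.contains p.2 then d else d.insert p.2 p.1) PySem.Dict.empty).getD s
        (pri.length : Int)) = (fun s => pvRk pri s) from funext (rank_getD pri)]
  rw [sorted2_eq_sorted_toLex obs (fun s => pvRk pri s)]
  -- A's count loop is Counter(obs)
  have hcnt : obs.foldl (fun c observed =>
      if c.contains observed then c.insert observed (c.getD observed 0 + 1)
      else c.insert observed 1) PySem.Dict.empty = PySem.Dict.counter obs := by
    rw [show (fun (c : PySem.Dict String Int) observed =>
        if c.contains observed then c.insert observed (c.getD observed 0 + 1)
        else c.insert observed 1) = (fun c observed => c.insert observed (c.getD observed 0 + 1)) from by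
      funext c x
      by_cases h : c.contains x
      · simp [h]
      · simp only [Bool.not_eq_true] at h
        rw [if_neg (by simp [h]), PySem.Dict.getD_of_not_contains c 0 h]
        norm_num]
    exact PySem.Dict.foldl_insert_getD_add_one_eq_counter obs
  rw [hcnt, loopA]
  -- A's head: blocks of priority species, dedup order
  set priB := PySem.List.dedup (pri.filter (fun s => obs.contains s)) with hpriB
  have hhead : pvEmit pri (PySem.Dict.counter obs)
      = priB.flatMap (fun s => List.replicate (obs.count s) s) := by
    rw [pvEmit_spec]
    rw [show (fun s => (PySem.Dict.counter obs).contains s) = (fun s => obs.contains s) from by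
      funext s; exact PySem.Dict.contains_counter obs s]
    apply List.flatMap_congr
    intro s _
    rw [PySem.Dict.getD_counter]
    simp
  -- A's final dict holds the non-priority species with their counts
  set dd := pri.foldl PySem.Dict.erase (PySem.Dict.counter obs) with hdd
  have hitems : dd.items = ((PySem.Set.ofList obs).filter (fun k => !pri.contains k)).map
      (fun k => (k, (obs.count k : Int))) := by
    rw [hdd, items_foldl_erase, PySem.Dict.items_counter, List.filter_map]
    rfl
  have hkeys : dd.keys = (PySem.Set.ofList obs).filter (fun k => !pri.contains k) := by
    rw [PySem.Dict.keys, hitems, List.map_map]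
    simp [Function.comp_def]
  have hknd : dd.keys.Nodup := by
    rw [hkeys]; exact (PySem.Set.nodup_ofList obs).filter _
  have hgetD : ∀ k ∈ dd.keys, dd.getD k 0 = (obs.count k : Int) := by
    intro k hk
    apply PySem.Dict.getD_of_mem_items _ _ hknd
    rw [hitems]
    rw [hkeys] at hk
    exact List.mem_map_of_mem hk
  rw [PySem.List.foldl_append_eq_flatMap]
  have hrem : dd.keys.flatMap (fun specie => List.replicate (dd.getD specie 0).toNat specie)
      = dd.keys.flatMap (fun k => List.replicate (obs.count k) k) := by
    apply List.flatMap_congr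
    intro k hk
    rw [hgetD k hk]
    simp
  rw [hhead, hrem]
  simp only [List.nil_append]
  -- membership facts
  have hmem_priB : ∀ s, s ∈ priB → s ∈ pri ∧ s ∈ obs := by
    intro s hs
    have := List.mem_filter.mp ((PySem.List.mem_dedup _ _).mp hs)
    exact ⟨this.1, by simpa using this.2⟩
  have hmem_keys : ∀ k, k ∈ dd.keys → k ∈ obs ∧ k ∉ pri := by
    intro k hk
    rw [hkeys] at hk
    have := List.mem_filter.mp hk
    refine ⟨(PySem.Set.mem_ofList _ _).mp this.1, by simpa using this.2⟩
  -- the two sides are permutations of each other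
  set H := priB.flatMap (fun s => List.replicate (obs.count s) s) with hH
  set T := PySem.List.sorted (dd.keys.flatMap (fun k => List.replicate (obs.count k) k)) (fun x => x) false with hT
  have hpermT : T.Perm (dd.keys.flatMap (fun k => List.replicate (obs.count k) k)) :=
    PySem.List.sorted_perm _ _ _
  have hP : (H ++ T).Perm obs := by
    rw [List.perm_iff_count]
    intro a
    rw [List.count_append, hH, count_flatMap_replicate _ _ _ (PySem.List.nodup_dedup _),
      hpermT.count_eq, count_flatMap_replicate _ _ _ hknd]
    by_cases hm : a ∈ obs
    · by_cases hp : a ∈ pri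
      · have h1 : a ∈ priB := by
          rw [hpriB, PySem.List.mem_dedup, List.mem_filter]
          exact ⟨hp, by simpa using hm⟩
        have h2 : a ∉ dd.keys := fun hk => (hmem_keys a hk).2 hp
        rw [if_pos h1, if_neg h2, Nat.add_zero]
      · have h1 : a ∉ priB := fun hb => hp (hmem_priB a hb).1
        have h2 : a ∈ dd.keys := by
          rw [hkeys, List.mem_filter]
          exact ⟨(PySem.Set.mem_ofList _ _).mpr hm, by simpa using hp⟩
        rw [if_neg h1, if_pos h2, Nat.zero_add]
    · have h1 : a ∉ priB := fun hb => hm (hmem_priB a hb).2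
      have h2 : a ∉ dd.keys := fun hk => hm (hmem_keys a hk).1
      rw [if_neg h1, if_neg h2, List.count_eq_zero.mpr hm]
  -- A's output is pairwise nondecreasing in pvKey
  have hpwH : H.Pairwise (fun a b => pvKey pri a ≤ pvKey pri b) := by
    apply pairwise_flatMap_key pri priB (fun s => obs.count s)
    exact dedup_filter_pairwise_rk pri (fun s => obs.contains s)
  have hmemT : ∀ x ∈ T, x ∈ obs ∧ x ∉ pri := by
    intro x hx
    have := hpermT.mem_iff.mp hx
    obtain ⟨k, hk, hxk⟩ := List.mem_flatMap.mp this
    have := List.eq_of_mem_replicate hxk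
    subst this
    exact hmem_keys _ hk
  have hpwT : T.Pairwise (fun a b => pvKey pri a ≤ pvKey pri b) := by
    refine (PySem.List.sorted_pairwise _ (fun (x : String) => x)).imp_of_mem ?_
    intro a b ha hb hab
    have hra := pvRk_of_not_mem (hmemT a ha).2
    have hrb := pvRk_of_not_mem (hmemT b hb).2
    exact Prod.Lex.toLex_le_toLex.mpr (Or.inr ⟨by rw [hra, hrb], hab⟩)
  have hpwA : (H ++ T).Pairwise (fun a b => pvKey pri a ≤ pvKey pri b) := by
    refine List.pairwise_append.mpr ⟨hpwH, hpwT, ?_⟩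
    intro a ha b hb
    obtain ⟨s, hs, has⟩ := List.mem_flatMap.mp ha
    have := List.eq_of_mem_replicate has
    subst this
    have h1 : pvRk pri a < (pri.length : Int) := pvRk_lt_of_mem (hmem_priB a hs).1
    have h2 := pvRk_of_not_mem (hmemT b hb).2
    exact le_of_lt (Prod.Lex.toLex_lt_toLex.mpr (Or.inl (by rw [h2]; exact h1)))
  -- conclude: both are key-nondecreasing rearrangements of obs, and pvKey is injective
  exact PySem.List.eq_of_perm_of_pairwise_le_of_injective (pvKey pri) (pvKey_injective pri)
    (hP.trans (PySem.List.sorted_perm obs (fun s => pvKey pri s) false).symm).symm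
    (PySem.List.sorted_pairwise obs (fun s => pvKey pri s)) hpwA |>.symm

-- ===== VERDICT (by name: the statement is the Claim_ definition above) =====
theorem prioritize_observations_spec : Claim_equal_prioritize_observations := by
  intro obs pri _
  exact prioritize_observations_spec' obs pri
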